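-- pv_equiv track=rewrite | github.com/alxhoff/TensorNAS | TensorNAS/Tools/Util.py | stack_str_blocks
-- ===== SOURCE A (Python) =====
-- def block_width(block):
--     try:
--         return block.index("\n")
--     except ValueError:
--         return len(block)
--
-- def stack_str_blocks(blocks):
--     import itertools
--
--     builder = []
--     block_lens = [block_width(bl) for bl in blocks]
--     split_blocks = [bl.split("\n") for bl in blocks]
--
--     for line_list in itertools.zip_longest(*split_blocks, fillvalue=None):
--         for i, line in enumerate(line_list):
--             if line is None:
--                 builder.append(" " * block_lens[i])
--             else:
--                 builder.append(line)
--             if i != len(line_list) - 1: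
--                 builder.append(" ")  # Padding
--         builder.append("\n")
--
--     return "".join(builder[:-1])
-- ===== SOURCE B (Python) =====
-- def block_width(block):
--     try:
--         return block.index("\n")
--     except ValueError:
--         return len(block)
--
-- def stack_str_blocks(blocks):
--     rows = None
--     filler = []
--     for bl in blocks:
--         pad = " " * block_width(bl)
--         lines = bl.split("\n")
--         if rows is None:
--             rows = [[l] for l in lines]
--         else:
--             for k in range(max(len(rows), len(lines))):
--                 if k >= len(rows):
--                     rows.append(list(filler))
--                 rows[k].append(lines[k] if k < len(lines) else pad)
--         filler.append(pad)
--     return "\n".join(" ".join(r) for r in rows) if rows is not None else ""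
-- ===== Notes on version B (the rewrite author's own statement) =====
-- stated objective: alternative
-- what changed: Replaces the zip_longest row-wise transposition and flat piece-builder by a left fold over the blocks that merges each block horizontally into accumulated per-row cell lists, keeping a filler list of pads for rows the earlier blocks do not reach, and joins cells and rows at the end.
import Mathlib
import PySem

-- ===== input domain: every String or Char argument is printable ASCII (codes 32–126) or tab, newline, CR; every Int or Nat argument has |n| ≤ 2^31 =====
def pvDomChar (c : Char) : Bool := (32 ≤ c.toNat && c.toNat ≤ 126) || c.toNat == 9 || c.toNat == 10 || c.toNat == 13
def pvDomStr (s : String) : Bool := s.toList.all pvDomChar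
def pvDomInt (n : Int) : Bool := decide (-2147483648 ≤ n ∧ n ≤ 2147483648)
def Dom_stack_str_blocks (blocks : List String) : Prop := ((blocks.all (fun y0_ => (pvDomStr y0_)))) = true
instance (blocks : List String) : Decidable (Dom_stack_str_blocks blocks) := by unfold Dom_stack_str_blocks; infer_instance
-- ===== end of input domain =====

-- B replaces A's zip_longest row-wise transposition + flat piece-builder by a left fold over the
-- blocks, merging each block horizontally into the accumulated row strings (alternative decomposition).

-- ===== PORT A =====

-- shared module helper block_width: try block.index("\n") / except ValueError: len(block)
-- (str.index raises exactly when PySem.Str.find returns -1)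
def block_width (block : String) : Int :=
  let i := PySem.Str.find block "\n"
  if i = -1 then PySem.Str.len block else i

-- itertools.zip_longest(*split_blocks, fillvalue=None): rows of heads, taking tails,
-- for exactly (max length) steps (zip_longest stops when all iterators are exhausted).
def pvMaxLen (ls : List (List String)) : Nat := ls.foldr (fun l m => max l.length m) 0

def pvZipLongestAux : Nat → List (List String) → List (List (Option String))
  | 0, _ => []
  | n + 1, ls => (ls.map List.head?) :: pvZipLongestAux n (ls.map List.tail)

def pvZipLongest (ls : List (List String)) : List (List (Option String)) :=
  pvZipLongestAux (pvMaxLen ls) ls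

def stack_str_blocks (blocks : List String) : String :=
  let block_lens : List Int := blocks.map block_width
  let split_blocks : List (List String) := blocks.map (fun bl => (PySem.Str.split? bl "\n").getD [])
  let builder : List String :=
    (pvZipLongest split_blocks).foldl (fun builder line_list =>
      let builder := (PySem.List.enumerate line_list 0).foldl (fun builder p =>
        let builder := builder ++
          [match p.2 with
           -- " " * block_lens[i]: the index i < len(block_lens) always, so getD's default is unreachable
           | none => String.mk (List.replicate (PySem.List.pyGetD block_lens p.1 0).toNat ' ')
           | some line => line]
        if p.1 ≠ (line_list.length : Int) - 1 then builder ++ [" "] else builder) builder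
      builder ++ ["\n"]) []
  PySem.Str.join "" (PySem.List.slice builder none (some (-1)))

-- ===== PORT B =====

-- the merge loop: for k in range(max(len(rows), len(lines))): row k gets one more cell
-- (rows[k] if present, else a copy of filler) ++ [lines[k] if present, else pad]
def pvMerge : List (List String) → List String → List String → String → List (List String)
  | [], _, [], _ => []
  | [], f, l :: ls, padb => (f ++ [l]) :: pvMerge [] f ls padb
  | r :: rs, f, [], padb => (r ++ [padb]) :: pvMerge rs f [] padb
  | r :: rs, f, l :: ls, padb => (r ++ [l]) :: pvMerge rs f ls padb

def stack_str_blocks_alt (blocks : List String) : String :=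
  let st := blocks.foldl (fun (st : Option (List (List String)) × List String) bl =>
    let padb := String.mk (List.replicate (block_width bl).toNat ' ')
    let lines := (PySem.Str.split? bl "\n").getD []
    ((match st.1 with
      | none => some (lines.map (fun l => [l]))
      | some rows => some (pvMerge rows st.2 lines padb)), st.2 ++ [padb])) (none, [])
  match st.1 with
  | none => ""
  | some rows => PySem.Str.join "\n" (rows.map (fun r => PySem.Str.join " " r))

-- ===== PRECONDITION & SPEC =====
def Spec_stack_str_blocks (blocks : List String) (out : String) : Prop := out = stack_str_blocks_alt blocks
instance (blocks : List String) (out : String) : Decidable (Spec_stack_str_blocks blocks out) := by unfold Spec_stack_str_blocks; infer_instance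

-- ===== CLAIM (what is proved, stated in full; the proofs are below) =====
def Claim_equal_stack_str_blocks : Prop := ∀ (blocks : List String), Dom_stack_str_blocks blocks → Spec_stack_str_blocks blocks (stack_str_blocks blocks)

-- ===== LEMMAS AND PROOFS =====

-- the cell a row entry (i, line) contributes
def pvCell (lens : List Int) (p : Int × Option String) : String :=
  match p.2 with
  | none => String.mk (List.replicate (PySem.List.pyGetD lens p.1 0).toNat ' ')
  | some line => line

-- A's inner loop, as the pieces each entry appends
def pvPieces (lens : List Int) (n : Int) (p : Int × Option String) : List String :=
  [pvCell lens p] ++ (if p.1 ≠ n - 1 then [" "] else [])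

theorem pvInnerFold (lens : List Int) (n : Int) (l : List (Int × Option String)) (b : List String) :
    l.foldl (fun builder p =>
      if p.1 ≠ n - 1 then
        builder ++
          ([match p.2 with
            | none => String.mk (List.replicate (PySem.List.pyGetD lens p.1 0).toNat ' ')
            | some line => line] ++ [" "])
      else
        builder ++
          [match p.2 with
           | none => String.mk (List.replicate (PySem.List.pyGetD lens p.1 0).toNat ' ')
           | some line => line]) b
    = b ++ l.flatMap (pvPieces lens n) := by
  induction l generalizing b with
  | nil => simp
  | cons x xs ih =>
      simp only [List.foldl_cons, List.flatMap_cons, ih]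
      by_cases h : x.1 ≠ n - 1 <;> simp [pvPieces, pvCell, h] <;> rfl

-- "".join: cons unfolding
theorem pvJoinNilCons (p : List Char) (rest : List (List Char)) :
    PySem.Chars.join [] (p :: rest) = p ++ PySem.Chars.join [] rest := by
  cases rest <;>
    simp [PySem.Chars.join_singleton, PySem.Chars.join_cons_cons, PySem.Chars.join_nil]

-- "".join distributes over append
theorem pvJoinNilAppend (xs ys : List (List Char)) :
    PySem.Chars.join [] (xs ++ ys) = PySem.Chars.join [] xs ++ PySem.Chars.join [] ys := by
  induction xs with
  | nil => simp [PySem.Chars.join_nil]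
  | cons x xs ih => simp [pvJoinNilCons, ih]

-- per-row: "".join of A's pieces = " ".join of B's cells (indices s, s+1, …; n = final index + 1)
theorem pvRowJoin (lens : List Int) (row : List (Option String)) (s n : Int)
    (h : s + row.length = n) (hne : row ≠ []) :
    PySem.Chars.join [] (((PySem.List.enumerate row s).flatMap (pvPieces lens n)).map String.toList)
    = PySem.Chars.join [' '] (((PySem.List.enumerate row s).map (pvCell lens)).map String.toList) := by
  induction row generalizing s with
  | nil => simp at hne
  | cons x xs ih =>
      rcases xs with _ | ⟨y, ys⟩
      · simp only [List.length_cons, List.length_nil] at h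
        have hs : s = n - 1 := by push_cast at h; omega
        simp [PySem.List.enumerate_cons, PySem.List.enumerate_nil, pvPieces, hs,
          PySem.Chars.join_singleton, pvJoinNilCons, PySem.Chars.join_nil]
      · have hs : s ≠ n - 1 := by
          simp only [List.length_cons] at h; push_cast at h; omega
        have h' : (s + 1) + ((y :: ys) : List (Option String)).length = n := by
          simp only [List.length_cons] at h ⊢; push_cast at h ⊢; omega
        have ihr := ih (s + 1) h' (by simp)
        simp only [PySem.List.enumerate_cons, List.flatMap_cons, List.map_cons, List.map_append,
          pvPieces, if_pos hs, List.singleton_append, List.cons_append, List.nil_append] at ihr ⊢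
        rw [pvJoinNilCons, pvJoinNilCons, PySem.Chars.join_cons_cons, ihr]
        simp [PySem.List.enumerate_cons]

-- rows of pvZipLongestAux all have the width of the input list
theorem pvZipLongestAux_row_len (n : Nat) (ls : List (List String)) :
    ∀ row ∈ pvZipLongestAux n ls, row.length = ls.length := by
  induction n generalizing ls with
  | zero => simp [pvZipLongestAux]
  | succ n ih =>
      intro row hrow
      simp only [pvZipLongestAux, List.mem_cons] at hrow
      rcases hrow with h | h
      · simp [h]
      · simpa using ih (ls.map List.tail) row h

-- top level: "".join of the flat builder minus its last "\n" = "\n".join of the row strings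
theorem pvTopJoin (lens : List Int) (rows : List (List (Option String)))
    (hr : ∀ row ∈ rows, row ≠ []) :
    PySem.Chars.join []
      (((rows.flatMap (fun row => (PySem.List.enumerate row 0).flatMap (pvPieces lens row.length) ++ ["\n"])).dropLast).map String.toList)
    = PySem.Chars.join ['\n']
      ((rows.map (fun row => PySem.Str.join " " ((PySem.List.enumerate row 0).map (pvCell lens)))).map String.toList) := by
  induction rows with
  | nil => simp [PySem.Chars.join_nil]
  | cons r rs ih =>
      have hrne : r ≠ [] := hr r (by simp)
      have hrow := pvRowJoin lens r 0 r.length (by simp) hrne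
      rcases rs with _ | ⟨r2, rs'⟩
      · simp only [List.flatMap_cons, List.flatMap_nil, List.append_nil, List.dropLast_concat,
          List.map_cons, List.map_nil, PySem.Chars.join_singleton]
        rw [hrow, PySem.Str.toList_join]
        simp [List.map_map]
      · have hne2 : ((r2 :: rs').flatMap (fun row => (PySem.List.enumerate row 0).flatMap (pvPieces lens row.length) ++ ["\n"])) ≠ [] := by
          simp
        rw [List.flatMap_cons, List.dropLast_append_of_ne_nil hne2, List.map_append,
          pvJoinNilAppend, List.map_append, pvJoinNilAppend,
          ih (fun row hrow => hr row (by simp [hrow]))]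
        simp only [List.map_cons, PySem.Chars.join_cons_cons, List.map_nil,
          PySem.Chars.join_singleton]
        rw [hrow, PySem.Str.toList_join]
        simp [List.map_map]

-- the outer builder loop of A, flattened
theorem pvBuilderEq (lens : List Int) (rows : List (List (Option String))) (b : List String) :
    rows.foldl (fun builder line_list =>
      (PySem.List.enumerate line_list 0).foldl (fun builder p =>
        if p.1 ≠ (line_list.length : Int) - 1 then
          builder ++
            ([match p.2 with
              | none => String.mk (List.replicate (PySem.List.pyGetD lens p.1 0).toNat ' ')
              | some line => line] ++ [" "])
        else
          builder ++
            [match p.2 with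
             | none => String.mk (List.replicate (PySem.List.pyGetD lens p.1 0).toNat ' ')
             | some line => line]) builder ++ ["\n"]) b
    = b ++ rows.flatMap (fun row => (PySem.List.enumerate row 0).flatMap (pvPieces lens row.length) ++ ["\n"]) := by
  induction rows generalizing b with
  | nil => simp
  | cons r rs ih =>
      simp only [List.foldl_cons, List.flatMap_cons]
      rw [ih, pvInnerFold]
      simp only [List.append_assoc]

-- A as "\n".join of row strings (the common intermediate form)
theorem pvA_eq (blocks : List String) :
    stack_str_blocks blocks
    = PySem.Str.join "\n"
        ((pvZipLongest (blocks.map (fun bl => (PySem.Str.split? bl "\n").getD []))).map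
          (fun row => PySem.Str.join " " ((PySem.List.enumerate row 0).map (pvCell (blocks.map block_width))))) := by
  unfold stack_str_blocks
  simp only [List.append_assoc]
  rw [pvBuilderEq, List.nil_append, PySem.List.slice_to_neg_one]
  apply String.toList_inj.mp
  rw [PySem.Str.toList_join, PySem.Str.toList_join]
  have hrne : ∀ row ∈ pvZipLongest (blocks.map (fun bl => (PySem.Str.split? bl "\n").getD [])),
      row ≠ [] := by
    intro row hrow
    simp only [pvZipLongest] at hrow
    have hl := pvZipLongestAux_row_len _ _ row hrow
    simp only [List.length_map] at hl
    cases blocks with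
    | nil => simp [pvMaxLen, pvZipLongestAux] at hrow
    | cons b bs =>
        intro hcon
        rw [hcon] at hl
        simp at hl
  simpa using pvTopJoin (blocks.map block_width) _ hrne

-- ======== B-side development: columns (remaining lines, pad) ========

def pvSp (w : Int) : String := String.mk (List.replicate w.toNat ' ')

def pvHeads (cols : List (List String × String)) : List (Option String × String) :=
  cols.map (fun c => (c.1.head?, c.2))

def pvTails (cols : List (List String × String)) : List (List String × String) :=
  cols.map (fun c => (c.1.tail, c.2))

def pvMaxC (cols : List (List String × String)) : Nat :=
  cols.foldr (fun c m => max c.1.length m) 0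

-- the grid of per-row cell lists, built column-wise: fuel = number of rows
def pvT : Nat → List (List String × String) → List (List String)
  | 0, _ => []
  | n + 1, cols => (pvHeads cols).map (fun c => c.1.getD c.2) :: pvT n (pvTails cols)

def pvColsOf (blocks : List String) : List (List String × String) :=
  blocks.map (fun bl => ((PySem.Str.split? bl "\n").getD [], pvSp (block_width bl)))

theorem pvMaxC_tails (cols : List (List String × String)) :
    pvMaxC (pvTails cols) = pvMaxC cols - 1 := by
  induction cols with
  | nil => rfl
  | cons c cs ih =>
      simp only [pvTails, List.map_cons, pvMaxC, List.foldr_cons] at ih ⊢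
      rw [ih]
      simp only [List.length_tail]
      omega

theorem pvMaxC_zero (cols : List (List String × String)) (h : pvMaxC cols = 0) :
    ∀ c ∈ cols, c.1 = [] := by
  induction cols with
  | nil => simp
  | cons c cs ih =>
      simp only [pvMaxC, List.foldr_cons] at h
      intro x hx
      rcases List.mem_cons.mp hx with rfl | hx
      · exact List.eq_nil_of_length_eq_zero (by omega)
      · exact ih (by simp only [pvMaxC]; omega) x hx

theorem pvHeads_of_empty (cols : List (List String × String)) (h : ∀ c ∈ cols, c.1 = []) :
    pvHeads cols = cols.map (fun c => (none, c.2)) := by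
  induction cols with
  | nil => rfl
  | cons c cs ih =>
      simp only [pvHeads, List.map_cons] at ih ⊢
      have hc := h c (by simp)
      rw [ih (fun x hx => h x (by simp [hx])), hc]
      rfl

theorem pvTails_of_empty (cols : List (List String × String)) (h : ∀ c ∈ cols, c.1 = []) :
    pvTails cols = cols := by
  induction cols with
  | nil => rfl
  | cons c cs ih =>
      simp only [pvTails, List.map_cons] at ih ⊢
      have hc := h c (by simp)
      have ht : c.1.tail = c.1 := by rw [hc]; rfl
      rw [ih (fun x hx => h x (by simp [hx])), ht, Prod.mk.eta]

-- the cells of an all-exhausted row are exactly the pads, i.e. the filler list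
theorem pvCells_of_empty (cols : List (List String × String)) :
    (cols.map (fun c => ((none : Option String), c.2))).map (fun c => c.1.getD c.2)
    = cols.map (·.2) := by
  simp [List.map_map]

theorem pvSnd_tails (cols : List (List String × String)) :
    (pvTails cols).map (·.2) = cols.map (·.2) := by
  simp [pvTails, List.map_map]

-- merge against an all-exhausted grid: each new row = filler plus the new block's line
theorem pvMergeEmpty (cols : List (List String × String)) (lines : List String) (padb : String)
    (h0 : pvMaxC cols = 0) :
    pvMerge [] (cols.map (·.2)) lines padb = pvT lines.length (cols ++ [(lines, padb)]) := by
  induction lines with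
  | nil => simp [pvMerge, pvT]
  | cons l ls ih =>
      have hemp := pvMaxC_zero cols h0
      simp only [pvMerge, List.length_cons, pvT, List.cons.injEq]
      constructor
      · rw [pvHeads, List.map_append, List.map_singleton, ← pvHeads,
          pvHeads_of_empty cols hemp, List.map_append, pvCells_of_empty]
        rfl
      · rw [pvTails, List.map_append, List.map_singleton, ← pvTails, pvTails_of_empty cols hemp]
        exact ih

-- the key snoc lemma: merging block (lines, padb) into the grid of cols
theorem pvMergeSnoc (m : Nat) (cols : List (List String × String)) (lines : List String)
    (padb : String) (hm : pvMaxC cols = m) :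
    pvMerge (pvT m cols) (cols.map (·.2)) lines padb
    = pvT (max m lines.length) (cols ++ [(lines, padb)]) := by
  induction m generalizing cols lines with
  | zero => simpa [pvT] using pvMergeEmpty cols lines padb hm
  | succ m ih =>
      have htm : pvMaxC (pvTails cols) = m := by rw [pvMaxC_tails, hm]; omega
      have hheads : pvHeads (cols ++ [(lines, padb)]) = pvHeads cols ++ [(lines.head?, padb)] := by
        simp [pvHeads]
      have htails : pvTails (cols ++ [(lines, padb)]) = pvTails cols ++ [(lines.tail, padb)] := by
        simp [pvTails]
      cases lines with
      | nil =>
          simp only [pvT, pvMerge, List.length_nil]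
          have hmx : max (m + 1) 0 = m + 1 := by omega
          rw [hmx]
          simp only [pvT, hheads, htails, List.cons.injEq]
          constructor
          · rw [List.map_append]; rfl
          · have := ih (pvTails cols) [] htm
            rw [pvSnd_tails] at this
            simpa using this
      | cons l ls =>
          simp only [pvT, pvMerge, List.length_cons]
          have hmax : max (m + 1) (ls.length + 1) = max m ls.length + 1 := by omega
          rw [hmax]
          simp only [pvT, hheads, htails, List.cons.injEq]
          constructor
          · rw [List.map_append]; rfl
          · have := ih (pvTails cols) ls htm
            rw [pvSnd_tails] at this
            simpa using this

-- a single block's grid: one singleton cell list per line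
theorem pvT_single (lines : List String) (padb : String) :
    pvT lines.length [(lines, padb)] = lines.map (fun l => [l]) := by
  induction lines with
  | nil => rfl
  | cons l ls ih =>
      simp [pvT, pvHeads, pvTails, ih]

-- B's fold, characterised
theorem pvFoldEq (bs : List String) (hne : bs ≠ []) :
    bs.foldl (fun (st : Option (List (List String)) × List String) bl =>
      let padb := String.mk (List.replicate (block_width bl).toNat ' ')
      let lines := (PySem.Str.split? bl "\n").getD []
      ((match st.1 with
        | none => some (lines.map (fun l => [l]))
        | some rows => some (pvMerge rows st.2 lines padb)), st.2 ++ [padb])) (none, [])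
    = (some (pvT (pvMaxC (pvColsOf bs)) (pvColsOf bs)), (pvColsOf bs).map (·.2)) := by
  induction bs using List.reverseRecOn with
  | nil => simp at hne
  | append_singleton xs x ih =>
      rw [List.foldl_append, List.foldl_cons, List.foldl_nil]
      rcases eq_or_ne xs [] with rfl | hxs
      · simp only [List.foldl_nil, pvColsOf, List.nil_append, List.map_singleton]
        have hmax : pvMaxC [((PySem.Str.split? x "\n").getD [], pvSp (block_width x))]
            = ((PySem.Str.split? x "\n").getD []).length := by
          simp [pvMaxC]
        rw [hmax, pvT_single]
        rfl
      · rw [ih hxs]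
        have hcols : pvColsOf (xs ++ [x]) = pvColsOf xs ++
            [((PySem.Str.split? x "\n").getD [], pvSp (block_width x))] := by
          simp [pvColsOf]
        have hmaxapp : pvMaxC (pvColsOf xs ++
              [((PySem.Str.split? x "\n").getD [], pvSp (block_width x))])
            = max (pvMaxC (pvColsOf xs)) ((PySem.Str.split? x "\n").getD []).length := by
          unfold pvMaxC
          rw [List.foldr_append]
          simp only [List.foldr_cons, List.foldr_nil]
          induction pvColsOf xs with
          | nil => simp
          | cons c cs ihc => simp only [List.foldr_cons, ihc]; omega
        simp only [Prod.mk.injEq]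
        constructor
        · rw [pvMergeSnoc (pvMaxC (pvColsOf xs)) (pvColsOf xs) _ _ rfl, hcols, hmaxapp]
          rfl
        · rw [hcols, List.map_append]
          rfl

-- ======== bridge: A's transposed rows = the column-wise grid ========

-- positional form of a row's cells: zip with the pads list instead of indexing lens
theorem pvCellsPositional (lens : List Int) (row : List (Option String)) (n : Nat)
    (h : n + row.length ≤ lens.length) :
    (PySem.List.enumerate row (n : Int)).map (pvCell lens)
    = (row.zip ((lens.map pvSp).drop n)).map (fun c => c.1.getD c.2) := by
  induction row generalizing n with
  | nil => simp [PySem.List.enumerate_nil]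
  | cons o os ih =>
      have hn : n < lens.length := by simp only [List.length_cons] at h; omega
      have hdrop : (lens.map pvSp).drop n = pvSp lens[n] :: (lens.map pvSp).drop (n + 1) := by
        rw [List.drop_eq_getElem_cons (by simpa using hn)]
        simp
      rw [hdrop]
      simp only [PySem.List.enumerate_cons, List.map_cons, List.zip_cons_cons,
        List.cons.injEq]
      constructor
      · have : PySem.List.pyGetD lens (n : Int) 0 = lens[n] := by
          rw [PySem.List.pyGetD_natCast, List.getD_eq_getElem lens 0 hn]
        cases o <;> simp [pvCell, this, pvSp]
      · have hrec := ih (n + 1) (by simp only [List.length_cons] at h; omega)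
        have hcast : ((n : Int) + 1) = (((n + 1 : Nat)) : Int) := by push_cast; ring
        rw [hcast, hrec]

theorem pvHeads_zip (ls : List (List String)) (pads : List String) :
    pvHeads (ls.zip pads) = (ls.map List.head?).zip pads := by
  induction ls generalizing pads with
  | nil => rfl
  | cons a as ih => cases pads with
      | nil => rfl
      | cons p ps => simp [pvHeads, List.zip_cons_cons, ← ih]

theorem pvTails_zip (ls : List (List String)) (pads : List String) :
    pvTails (ls.zip pads) = (ls.map List.tail).zip pads := by
  induction ls generalizing pads with
  | nil => rfl
  | cons a as ih => cases pads with
      | nil => rfl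
      | cons p ps => simp [pvTails, List.zip_cons_cons, ← ih]

theorem pvBridge (n : Nat) (ls : List (List String)) (lens : List Int)
    (hlen : ls.length = lens.length) :
    (pvZipLongestAux n ls).map
        (fun row => (PySem.List.enumerate row 0).map (pvCell lens))
    = pvT n (ls.zip (lens.map pvSp)) := by
  induction n generalizing ls with
  | zero => rfl
  | succ n ih =>
      simp only [pvZipLongestAux, List.map_cons, pvT, List.cons.injEq]
      constructor
      · rw [pvHeads_zip]
        have h0 : ((0 : Nat) : Int) = (0 : Int) := by norm_num
        rw [← h0, pvCellsPositional lens (ls.map List.head?) 0 (by simpa using hlen.le)]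
        simp
      · rw [pvTails_zip]
        exact ih (ls.map List.tail) (by simpa using hlen)

-- ===== VERDICT (by name: the statement is the Claim_ definition above) =====
theorem stack_str_blocks_spec : Claim_equal_stack_str_blocks := by
  intro blocks _
  unfold Spec_stack_str_blocks
  cases blocks with
  | nil => rfl
  | cons b bs =>
      rw [pvA_eq]
      unfold stack_str_blocks_alt
      rw [pvFoldEq (b :: bs) (by simp)]
      simp only []
      congr 1
      have hzip : ((b :: bs).map (fun bl => (PySem.Str.split? bl "\n").getD [])).zip
            (((b :: bs).map block_width).map pvSp) = pvColsOf (b :: bs) := by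
        rw [List.map_map]
        exact List.zip_map'
      have hfuel : pvMaxLen ((b :: bs).map (fun bl => (PySem.Str.split? bl "\n").getD []))
          = pvMaxC (pvColsOf (b :: bs)) := by
        unfold pvMaxLen pvMaxC pvColsOf
        rw [List.foldr_map, List.foldr_map]
      rw [pvZipLongest, hfuel, ← hzip, ← pvBridge _ _ ((b :: bs).map block_width) (by simp)]
      simp [List.map_map]
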